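-- pv_equiv track=rewrite | github.com/Marto-ZZ/IP-2c2025 | Python/guias resueltas/guia7.py | pos_minimo
-- ===== SOURCE A (Python) =====
-- def pos_minimo(s:list) -> int:
--     if len(s) == 0:
--         return -1
--     numero_anterior = s[0]
--     posicion = 0
--     for i in s:
--         if i < numero_anterior:
--             numero_anterior = i
--             posicion += 1
--     return posicion
-- ===== SOURCE B (Python) =====
-- def pos_minimo(s: list) -> int:
--     if len(s) == 0:
--         return -1
--     mins = []
--     m = s[0]
--     for x in s:
--         m = min(m, x)
--         mins.append(m)
--     return sum(1 for a, b in zip(mins, mins[1:]) if b < a)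
-- ===== Notes on version B (the rewrite author's own statement) =====
-- stated objective: alternative
-- what changed: B first materialises the prefix-minimum table, then counts adjacent strict decreases in that table with a zip scan, instead of A's single fused min-and-count loop.
import Mathlib
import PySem

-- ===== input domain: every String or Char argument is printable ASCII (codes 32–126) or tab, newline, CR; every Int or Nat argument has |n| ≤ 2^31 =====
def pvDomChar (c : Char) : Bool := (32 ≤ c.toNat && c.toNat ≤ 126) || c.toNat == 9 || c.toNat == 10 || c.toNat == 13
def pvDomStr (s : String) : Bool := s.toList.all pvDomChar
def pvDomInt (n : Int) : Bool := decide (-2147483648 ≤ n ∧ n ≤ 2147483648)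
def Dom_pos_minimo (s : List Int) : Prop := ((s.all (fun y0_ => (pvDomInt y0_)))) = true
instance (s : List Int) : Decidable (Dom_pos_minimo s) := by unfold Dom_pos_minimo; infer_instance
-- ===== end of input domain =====

-- B builds the prefix-minimum table first and then counts adjacent strict decreases in it,
-- instead of A's single fused min-and-count loop; same O(n) cost, different decomposition.


-- ===== PORT A =====
-- fold state = (numero_anterior, posicion), exactly A's loop
def pos_minimo (s : List Int) : Int :=
  match s with
  | [] => -1
  | h :: _ =>
    let st := s.foldl (fun (st : Int × Int) i => if i < st.1 then (i, st.2 + 1) else st) (h, 0)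
    st.2

-- ===== PORT B =====
-- B's first loop: build the prefix-minimum table (mins)
def pvPrefixMins (m : Int) (xs : List Int) : List Int :=
  match xs with
  | [] => []
  | x :: t =>
    let m' := min m x
    m' :: pvPrefixMins m' t

def pos_minimo_alt (s : List Int) : Int :=
  match s with
  | [] => -1
  | h :: _ =>
    let mins := pvPrefixMins h s
    ((mins.zip mins.tail).countP (fun p => decide (p.2 < p.1)) : Int)

-- ===== PRECONDITION & SPEC =====
def Spec_pos_minimo (s : List Int) (out : Int) : Prop := out = pos_minimo_alt s
instance (s : List Int) (out : Int) : Decidable (Spec_pos_minimo s out) := by unfold Spec_pos_minimo; infer_instance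

-- ===== CLAIM (what is proved, stated in full; the proofs are below) =====
def Claim_equal_pos_minimo : Prop := ∀ (s : List Int), Dom_pos_minimo s → Spec_pos_minimo s (pos_minimo s)

-- ===== LEMMAS AND PROOFS =====

-- number of strict decreases of the running minimum started at m, the common abstraction
def pvDesc (m : Int) (xs : List Int) : Nat :=
  match xs with
  | [] => 0
  | x :: t => (if x < m then 1 else 0) + pvDesc (min m x) t

theorem pvFold_snd (xs : List Int) : ∀ (m c : Int),
    (xs.foldl (fun (st : Int × Int) i => if i < st.1 then (i, st.2 + 1) else st) (m, c)).2
      = c + (pvDesc m xs : Int) := by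
  induction xs with
  | nil => intro m c; simp [pvDesc]
  | cons x t ih =>
    intro m c
    simp only [List.foldl_cons, pvDesc]
    by_cases h : x < m
    · have hm : min m x = x := min_eq_right (le_of_lt h)
      simp [h, hm, ih x (c + 1)]; push_cast; ring
    · have hm : min m x = m := min_eq_left (not_lt.mp h)
      simp [h, hm, ih m c]

theorem pvAdj_prefixMins (xs : List Int) : ∀ (m : Int),
    (((m :: pvPrefixMins m xs).zip (m :: pvPrefixMins m xs).tail).countP
        (fun p => decide (p.2 < p.1)))
      = pvDesc m xs := by
  induction xs with
  | nil => intro m; simp [pvPrefixMins, pvDesc]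
  | cons x t ih =>
    intro m
    have hlt : (min m x < m) ↔ (x < m) := by
      constructor
      · intro h; by_contra hx
        have : min m x = m := min_eq_left (not_lt.mp hx)
        omega
      · intro h; have : min m x = x := min_eq_right (le_of_lt h); omega
    simp only [pvPrefixMins, pvDesc, List.tail_cons, List.zip_cons_cons, List.countP_cons]
    rw [← ih (min m x)]
    simp only [List.tail_cons]
    by_cases h : x < m
    · simp [hlt, h]; omega
    · simp [hlt, h]

-- ===== VERDICT (by name: the statement is the Claim_ definition above) =====
theorem pos_minimo_spec : Claim_equal_pos_minimo := by
  intro s _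
  unfold Spec_pos_minimo pos_minimo pos_minimo_alt
  match s with
  | [] => rfl
  | h :: t =>
    simp only
    have hmins : pvPrefixMins h (h :: t) = h :: pvPrefixMins h t := by
      simp [pvPrefixMins]
    rw [hmins, pvAdj_prefixMins t h]
    simp only [List.foldl_cons, lt_irrefl, if_false, pvFold_snd t h 0]
    simp
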